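-- pv_equiv track=rewrite | github.com/amingclawdev/aming-claw | agent/governance/dirty_worktree.py | is_ignored_dirty_path
-- ===== SOURCE A (Python) =====
-- DIRTY_IGNORE_PREFIXES = (
--     ".claude/", ".claude\\",
--     ".codex/", ".codex\\",
--     ".hypothesis/", ".hypothesis\\",
--     ".venv/", ".venv\\",
--     ".worktrees/", ".worktrees\\",
--     "build/", "build\\",
--     "docs/dev/", "docs/dev\\",
--     ".recent-tasks.json",
--     ".governance-cache/", ".governance-cache\\",
--     ".observer-cache/", ".observer-cache\\",
--     ".aming-claw/cache/", ".aming-claw\\cache\\",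
-- )
--
-- def normalize_dirty_path(path: str) -> str:
--     text = str(path or "").strip()
--     if " -> " in text:
--         text = text.rsplit(" -> ", 1)[1].strip()
--     return text.replace("\\", "/").strip("/")
--
-- def is_ignored_dirty_path(path: str) -> bool:
--     normalized = normalize_dirty_path(path)
--     if not normalized:
--         return False
--     for prefix in DIRTY_IGNORE_PREFIXES:
--         clean_prefix = normalize_dirty_path(prefix)
--         if normalized == clean_prefix or normalized.startswith(f"{clean_prefix}/"):
--             return True
--     return False
-- ===== SOURCE B (Python) =====
-- DIRTY_IGNORE_PREFIXES = (
--     ".claude/", ".claude\\",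
--     ".codex/", ".codex\\",
--     ".hypothesis/", ".hypothesis\\",
--     ".venv/", ".venv\\",
--     ".worktrees/", ".worktrees\\",
--     "build/", "build\\",
--     "docs/dev/", "docs/dev\\",
--     ".recent-tasks.json",
--     ".governance-cache/", ".governance-cache\\",
--     ".observer-cache/", ".observer-cache\\",
--     ".aming-claw/cache/", ".aming-claw\\cache\\",
-- )
--
--
-- def normalize_dirty_path(path: str) -> str:
--     text = str(path or "").strip()
--     if " -> " in text:
--         text = text.rsplit(" -> ", 1)[1].strip()
--     return text.replace("\\", "/").strip("/")
--
--
-- _PREFIX_SET = {normalize_dirty_path(p) for p in DIRTY_IGNORE_PREFIXES}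
--
--
-- def is_ignored_dirty_path(path: str) -> bool:
--     normalized = normalize_dirty_path(path)
--     if not normalized:
--         return False
--     prefix = ""
--     for segment in normalized.split("/"):
--         prefix = segment if not prefix else f"{prefix}/{segment}"
--         if prefix in _PREFIX_SET:
--             return True
--     return False
-- ===== Notes on version B (the rewrite author's own statement) =====
-- stated objective: alternative
-- what changed: B precomputes the set of normalized ignore prefixes once and walks the normalized path's slash-separated segments, testing each cumulative prefix for set membership, instead of A's per-call scan over the prefix tuple with re-normalization and startswith tests.
import Mathlib
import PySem

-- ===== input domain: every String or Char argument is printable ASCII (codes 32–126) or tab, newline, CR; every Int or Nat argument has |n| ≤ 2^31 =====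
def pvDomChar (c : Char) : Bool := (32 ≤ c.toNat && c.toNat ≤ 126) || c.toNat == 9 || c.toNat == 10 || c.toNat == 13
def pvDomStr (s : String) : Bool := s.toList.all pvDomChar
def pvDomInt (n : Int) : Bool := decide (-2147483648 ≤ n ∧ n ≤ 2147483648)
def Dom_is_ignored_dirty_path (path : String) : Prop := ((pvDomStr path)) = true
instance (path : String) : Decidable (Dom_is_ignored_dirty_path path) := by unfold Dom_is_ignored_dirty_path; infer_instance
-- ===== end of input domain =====

-- ===== PORT A =====
-- B changes the scan: instead of testing the normalized path against every ignore prefix,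
-- it precomputes the set of normalized prefixes once and walks the path's own slash-separated segments,
-- looking each cumulative prefix up in the set (objective: alternative decomposition).

def DIRTY_IGNORE_PREFIXES : List String := [
    ".claude/", ".claude\\",
    ".codex/", ".codex\\",
    ".hypothesis/", ".hypothesis\\",
    ".venv/", ".venv\\",
    ".worktrees/", ".worktrees\\",
    "build/", "build\\",
    "docs/dev/", "docs/dev\\",
    ".recent-tasks.json",
    ".governance-cache/", ".governance-cache\\",
    ".observer-cache/", ".observer-cache\\",
    ".aming-claw/cache/", ".aming-claw\\cache\\"]

def normalize_dirty_path (path : String) : String :=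
  -- str(path or "") = path itself for a string argument ("" stays "")
  let text := PySem.Str.strip path
  let text := if PySem.Str.isIn " -> " text then
      -- text.rsplit(" -> ", 1)[1]: the part after the LAST occurrence
      -- (exact: when the separator occurs, rsplit(sep,1)[1] = text[text.rfind(sep)+len(sep):])
      PySem.Str.strip (PySem.Str.slice text (some (PySem.Str.rfind text " -> " + 4)) none)
    else text
  PySem.Str.stripChars (PySem.Str.replace text "\\" "/") "/"

def is_ignored_dirty_path (path : String) : Bool :=
  let normalized := normalize_dirty_path path
  if normalized = "" then false
  else DIRTY_IGNORE_PREFIXES.any (fun pfx =>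
    let clean_prefix := normalize_dirty_path pfx
    -- f"{clean_prefix}/" (exact: string concatenation via char lists)
    normalized == clean_prefix ||
      PySem.Str.startswith normalized (String.ofList (clean_prefix.toList ++ ['/'])))

-- ===== PORT B =====

-- _PREFIX_SET = {normalize_dirty_path(p) for p in DIRTY_IGNORE_PREFIXES}
def pvPrefixSet : PySem.Set String :=
  PySem.Set.ofList (DIRTY_IGNORE_PREFIXES.map normalize_dirty_path)

def pvScanSegs (pfx : String) : List String → Bool
  | [] => false
  | seg :: rest =>
    -- prefix = segment if not prefix else f"{prefix}/{segment}"
    let pfx' := if pfx = "" then seg else String.ofList (pfx.toList ++ '/' :: seg.toList)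
    if PySem.Set.contains pvPrefixSet pfx' then true else pvScanSegs pfx' rest

def is_ignored_dirty_path_alt (path : String) : Bool :=
  let normalized := normalize_dirty_path path
  if normalized = "" then false
  else pvScanSegs "" ((PySem.Str.split? normalized "/").getD [])

-- ===== PRECONDITION & SPEC =====
def Spec_is_ignored_dirty_path (path : String) (out : Bool) : Prop := out = is_ignored_dirty_path_alt path
instance (path : String) (out : Bool) : Decidable (Spec_is_ignored_dirty_path path out) := by unfold Spec_is_ignored_dirty_path; infer_instance

-- ===== CLAIM (what is proved, stated in full; the proofs are below) =====
def Claim_equal_is_ignored_dirty_path : Prop := ∀ (path : String), Dom_is_ignored_dirty_path path → Spec_is_ignored_dirty_path path (is_ignored_dirty_path path)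

-- ===== LEMMAS AND PROOFS =====

-- fuel-free reference form of PySem.Chars.splitOn on the single-character separator '/'
def mySplit (cur : List Char) : List Char → List (List Char)
  | [] => [cur.reverse]
  | c :: t => if c = '/' then cur.reverse :: mySplit [] t else mySplit (c :: cur) t

-- joining segments back with '/' separators, after an already-joined first part pre
def joinAll (pre : List Char) (segs : List (List Char)) : List Char :=
  pre ++ segs.flatMap (fun s => '/' :: s)

-- the cumulative prefixes obtained by extending pre with each further segment
def cum (pre : List Char) : List (List Char) → List (List Char)
  | [] => []
  | s :: t => (pre ++ '/' :: s) :: cum (pre ++ '/' :: s) t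

def cumTop : List (List Char) → List (List Char)
  | [] => []
  | s :: t => s :: cum s t

def joinTop : List (List Char) → List Char
  | [] => []
  | s :: t => joinAll s t

theorem splitOn_go_eq : ∀ (l : List Char) (fuel : Nat) (acc : List (List Char)) (cur' : List Char),
    l.length < fuel →
    PySem.Chars.splitOn.go ['/'] fuel l cur' acc = acc.reverse ++ mySplit cur' l := by
  intro l
  induction l with
  | nil =>
    intro fuel acc cur' h
    cases fuel with
    | zero => omega
    | succ f => simp [PySem.Chars.splitOn.go, mySplit]
  | cons c r ih =>
    intro fuel acc cur' h
    cases fuel with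
    | zero => omega
    | succ f =>
      by_cases hc : c = '/'
      · subst hc
        rw [show PySem.Chars.splitOn.go ['/'] (f+1) ('/' :: r) cur' acc
            = PySem.Chars.splitOn.go ['/'] f r [] (cur'.reverse :: acc) from by
          simp [PySem.Chars.splitOn.go, List.isPrefixOf]]
        rw [ih f _ _ (by simpa using h)]
        simp [mySplit]
      · rw [show PySem.Chars.splitOn.go ['/'] (f+1) (c :: r) cur' acc
            = PySem.Chars.splitOn.go ['/'] f r (c :: cur') acc from by
          simp [PySem.Chars.splitOn.go, List.isPrefixOf, beq_iff_eq, Ne.symm hc]]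
        rw [ih f _ _ (by simpa using h)]
        simp [mySplit, hc]

theorem splitOn_eq (cs : List Char) : PySem.Chars.splitOn cs ['/'] = mySplit [] cs := by
  rw [show PySem.Chars.splitOn cs ['/'] = PySem.Chars.splitOn.go ['/'] (cs.length + 1) cs [] []
    from rfl]
  rw [splitOn_go_eq cs (cs.length + 1) [] [] (by omega)]
  rfl

theorem mySplit_ne_nil : ∀ (l cur : List Char), mySplit cur l ≠ [] := by
  intro l
  induction l with
  | nil => intro cur; simp [mySplit]
  | cons c t ih =>
    intro cur
    by_cases hc : c = '/' <;> simp [mySplit, hc, ih]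

theorem joinAll_cons (pre s : List Char) (t : List (List Char)) :
    joinAll pre (s :: t) = joinAll (pre ++ '/' :: s) t := by
  simp [joinAll]

theorem mySplit_join : ∀ (l cur : List Char), joinTop (mySplit cur l) = cur.reverse ++ l := by
  intro l
  induction l with
  | nil => intro cur; simp [mySplit, joinTop, joinAll]
  | cons c t ih =>
    intro cur
    by_cases hc : c = '/'
    · subst hc
      obtain ⟨s0, t0, h0⟩ : ∃ s0 t0, mySplit [] t = s0 :: t0 := by
        cases h : mySplit ([] : List Char) t with
        | nil => exact absurd h (mySplit_ne_nil t [])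
        | cons a b => exact ⟨a, b, rfl⟩
      have := ih []
      rw [h0] at this
      simp only [joinTop, joinAll, List.reverse_nil, List.nil_append] at this
      simp only [mySplit, h0, joinTop, joinAll]
      simp only [joinTop, joinAll] at *
      rw [← this]
      simp
    · have := ih (c :: cur)
      simp only [mySplit, if_neg hc]
      rw [this]
      simp

theorem mySplit_append : ∀ (q : List Char) (cur t : List Char),
    mySplit cur (q ++ '/' :: t) = mySplit cur q ++ mySplit [] t := by
  intro q
  induction q with
  | nil => intro cur t; simp [mySplit]
  | cons c q' ih =>
    intro cur t
    by_cases hc : c = '/' <;> simp [mySplit, hc, ih]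

theorem cum_head_or (t : List (List Char)) (pre : List Char) :
    pre = joinAll pre t ∨ pre ++ ['/'] <+: joinAll pre t := by
  cases t with
  | nil => left; simp [joinAll]
  | cons s t' =>
    right
    simp only [joinAll, List.flatMap_cons]
    exact ⟨s ++ t'.flatMap (fun s => '/' :: s), by simp⟩

theorem cum_mem : ∀ (t : List (List Char)) (pre q : List Char), q ∈ cum pre t →
    q = joinAll pre t ∨ q ++ ['/'] <+: joinAll pre t := by
  intro t
  induction t with
  | nil => intro pre q h; simp [cum] at h
  | cons s t' ih =>
    intro pre q h
    rw [joinAll_cons]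
    rcases (by simpa [cum] using h : q = pre ++ '/' :: s ∨ q ∈ cum (pre ++ '/' :: s) t') with h1 | h1
    · subst h1; exact cum_head_or t' _
    · exact ih _ _ h1

theorem cumTop_mem (segs : List (List Char)) (q : List Char) (h : q ∈ cumTop segs) :
    q = joinTop segs ∨ q ++ ['/'] <+: joinTop segs := by
  cases segs with
  | nil => simp [cumTop] at h
  | cons s t =>
    rcases (by simpa [cumTop] using h : q = s ∨ q ∈ cum s t) with h1 | h1
    · subst h1; exact cum_head_or t q
    · exact cum_mem t s q h1

theorem joinAll_mem_cum : ∀ (t : List (List Char)) (pre : List Char),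
    joinAll pre t ∈ pre :: cum pre t := by
  intro t
  induction t with
  | nil => intro pre; simp [joinAll, cum]
  | cons s t' ih =>
    intro pre
    rw [joinAll_cons]
    have := ih (pre ++ '/' :: s)
    simp only [cum, List.mem_cons]
    rcases List.mem_cons.mp this with h | h
    · right; left; exact h
    · right; right; exact h

theorem joinTop_mem_cumTop (segs : List (List Char)) (h : segs ≠ []) :
    joinTop segs ∈ cumTop segs := by
  cases segs with
  | nil => exact absurd rfl h
  | cons s t =>
    simpa [joinTop, cumTop] using joinAll_mem_cum t s

theorem cum_append : ∀ (A B : List (List Char)) (pre : List Char),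
    cum pre (A ++ B) = cum pre A ++ cum (joinAll pre A) B := by
  intro A
  induction A with
  | nil => intro B pre; simp [cum, joinAll]
  | cons s A' ih =>
    intro B pre
    simp only [List.cons_append, cum, ih, joinAll_cons, List.cons_append]

theorem bridge (cs q : List Char) (_hcs : cs ≠ []) :
    q ∈ cumTop (mySplit [] cs) ↔ cs = q ∨ q ++ ['/'] <+: cs := by
  have hj : joinTop (mySplit [] cs) = cs := by simpa using mySplit_join cs []
  constructor
  · intro h
    rcases cumTop_mem _ _ h with h1 | h1
    · left; rw [← hj, h1]
    · right; rwa [hj] at h1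
  · intro h
    rcases h with h1 | h1
    · subst h1
      have h2 := joinTop_mem_cumTop (mySplit [] cs) (mySplit_ne_nil cs [])
      rwa [hj] at h2
    · obtain ⟨t, ht⟩ := h1
      have hcs' : cs = q ++ '/' :: t := by rw [← ht]; simp
      rw [hcs', mySplit_append]
      have hq : joinTop (mySplit [] q) = q := by simpa using mySplit_join q []
      obtain ⟨s0, A', hA⟩ : ∃ s0 A', mySplit ([] : List Char) q = s0 :: A' := by
        cases h : mySplit ([] : List Char) q with
        | nil => exact absurd h (mySplit_ne_nil q [])
        | cons a b => exact ⟨a, b, rfl⟩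
      rw [hA]
      have hmem : q ∈ cumTop (s0 :: A') := by
        rw [← hq, hA]; exact joinTop_mem_cumTop _ (by simp)
      simp only [List.cons_append, cumTop, cum_append, List.mem_cons, List.mem_append]
      rcases List.mem_cons.mp (by simpa [cumTop] using hmem) with h2 | h2
      · left; exact h2
      · right; left; exact h2

theorem mySplit_head_ne_nil : ∀ (l cur : List Char), cur ≠ [] →
    ∃ s0 t, mySplit cur l = s0 :: t ∧ s0 ≠ [] := by
  intro l
  induction l with
  | nil =>
    intro cur h
    exact ⟨cur.reverse, [], rfl, by simpa using h⟩
  | cons c t ih =>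
    intro cur h
    by_cases hc : c = '/'
    · exact ⟨cur.reverse, mySplit [] t, by simp [mySplit, hc], by simpa using h⟩
    · obtain ⟨s0, t0, h1, h2⟩ := ih (c :: cur) (by simp)
      exact ⟨s0, t0, by simp [mySplit, hc, h1], h2⟩

theorem ofList_ne_empty (l : List Char) (h : l ≠ []) : String.ofList l ≠ "" := by
  intro hcontra
  apply h
  have := congrArg String.toList hcontra
  simpa using this

theorem scan_nil (pre : String) : pvScanSegs pre [] = false := by simp [pvScanSegs]

theorem scan_cons (pre : String) (h : pre ≠ "") (s : List Char) (t : List String) :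
    pvScanSegs pre (String.ofList s :: t) =
      (if PySem.Set.contains pvPrefixSet (String.ofList (pre.toList ++ '/' :: s)) = true then true
       else pvScanSegs (String.ofList (pre.toList ++ '/' :: s)) t) := by
  simp only [pvScanSegs, if_neg h, String.toList_ofList]

theorem scan_eq : ∀ (segsL : List (List Char)) (pre : String), pre ≠ "" →
    (pvScanSegs pre (segsL.map String.ofList) = true ↔
      ∃ q ∈ cum pre.toList segsL, PySem.Set.contains pvPrefixSet (String.ofList q) = true) := by
  intro segsL
  induction segsL with
  | nil =>
    intro pre h
    constructor
    · intro h'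
      rw [List.map_nil, scan_nil] at h'
      exact absurd h' (by simp)
    · intro ⟨q, hq, _⟩
      rw [show cum pre.toList [] = [] from rfl] at hq
      exact absurd hq (List.not_mem_nil)
  | cons s t ih =>
    intro pre h
    rw [List.map_cons, scan_cons pre h s (t.map String.ofList)]
    by_cases hmem : PySem.Set.contains pvPrefixSet (String.ofList (pre.toList ++ '/' :: s)) = true
    · rw [if_pos hmem]
      constructor
      · intro _
        exact ⟨pre.toList ++ '/' :: s, List.mem_cons_self .., hmem⟩
      · intro _; rfl
    · rw [if_neg hmem]
      rw [ih (String.ofList (pre.toList ++ '/' :: s)) (ofList_ne_empty _ (by simp))]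
      rw [String.toList_ofList]
      constructor
      · intro ⟨q, hq, hq2⟩; exact ⟨q, List.mem_cons_of_mem _ hq, hq2⟩
      · intro ⟨q, hq, hq2⟩
        rcases List.mem_cons.mp hq with h1 | h1
        · subst h1; exact absurd hq2 hmem
        · exact ⟨q, h1, hq2⟩

theorem scan_top (s0 : List Char) (t : List (List Char)) (hs0 : s0 ≠ []) :
    (pvScanSegs "" ((s0 :: t).map String.ofList) = true ↔
      ∃ q ∈ cumTop (s0 :: t), PySem.Set.contains pvPrefixSet (String.ofList q) = true) := by
  rw [List.map_cons]
  rw [show pvScanSegs "" (String.ofList s0 :: t.map String.ofList)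
      = (if PySem.Set.contains pvPrefixSet (String.ofList s0) = true then true
         else pvScanSegs (String.ofList s0) (t.map String.ofList)) from by
    simp only [pvScanSegs, ite_true]]
  by_cases hmem : PySem.Set.contains pvPrefixSet (String.ofList s0) = true
  · rw [if_pos hmem]
    constructor
    · intro _
      exact ⟨s0, List.mem_cons_self .., hmem⟩
    · intro _; rfl
  · rw [if_neg hmem]
    rw [scan_eq t (String.ofList s0) (ofList_ne_empty _ hs0)]
    rw [String.toList_ofList]
    constructor
    · intro ⟨q, hq, hq2⟩
      exact ⟨q, List.mem_cons_of_mem _ hq, hq2⟩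
    · intro ⟨q, hq, hq2⟩
      rcases List.mem_cons.mp hq with h1 | h1
      · subst h1; exact absurd hq2 hmem
      · exact ⟨q, h1, hq2⟩

theorem head?_eq_of_prefix {w z : List Char} (h : w <+: z) (a : Char) (hw : w.head? = some a) :
    z.head? = some a := by
  obtain ⟨r, hr⟩ := h
  subst hr
  cases w with
  | nil => simp at hw
  | cons x xs => simpa using hw

theorem strip2_head (p : Char → Bool) (l : List Char) (a : Char)
    (h : ((List.dropWhile p ((List.dropWhile p l).reverse)).reverse).head? = some a) :
    p a = false := by
  have hpref : (List.dropWhile p ((List.dropWhile p l).reverse)).reverse <+: List.dropWhile p l := by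
    conv_rhs => rw [← List.reverse_reverse (List.dropWhile p l)]
    exact List.reverse_prefix.mpr (List.dropWhile_suffix p)
  have hzh := head?_eq_of_prefix hpref a h
  have hzne : List.dropWhile p l ≠ [] := by
    intro h0; rw [h0] at hzh; simp at hzh
  have hfalse := List.head_dropWhile_not p hzne
  have hha : (List.dropWhile p l).head hzne = a := by
    have h2 := List.head?_eq_some_head (l := List.dropWhile p l) hzne
    rw [hzh] at h2
    exact (Option.some_inj.mp h2).symm
  rw [← hha]
  exact hfalse

theorem stripChars_head (l : List Char) :
    (PySem.Chars.stripChars l ['/']).head? ≠ some '/' := by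
  intro hcontra
  have h := strip2_head (fun c => List.contains ['/'] c) l '/' hcontra
  simp at h

theorem normalize_head (path : String) :
    (normalize_dirty_path path).toList.head? ≠ some '/' := by
  unfold normalize_dirty_path
  rw [PySem.Str.toList_stripChars]
  exact stripChars_head _

-- the common characterisation both loops are reduced to
def CommonCond (ns : String) : Prop :=
  ∃ pfx ∈ DIRTY_IGNORE_PREFIXES,
    (ns.toList = (normalize_dirty_path pfx).toList ∨
      (normalize_dirty_path pfx).toList ++ ['/'] <+: ns.toList)

theorem lemA (ns : String) :
    (DIRTY_IGNORE_PREFIXES.any (fun pfx =>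
      let clean_prefix := normalize_dirty_path pfx
      ns == clean_prefix ||
        PySem.Str.startswith ns (String.ofList (clean_prefix.toList ++ ['/']))) = true)
      ↔ CommonCond ns := by
  simp only [List.any_eq_true, Bool.or_eq_true, beq_iff_eq, CommonCond]
  constructor
  · intro ⟨pfx, hmem, h⟩
    refine ⟨pfx, hmem, ?_⟩
    rcases h with h | h
    · left; rw [h]
    · right
      have h2 := (PySem.Chars.startswith_iff _ _).mp (by rwa [PySem.Str.startswith_eq] at h)
      rwa [String.toList_ofList] at h2
  · intro ⟨pfx, hmem, h⟩
    refine ⟨pfx, hmem, ?_⟩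
    rcases h with h | h
    · left; exact String.toList_inj.mp h
    · right
      rw [PySem.Str.startswith_eq]
      apply (PySem.Chars.startswith_iff _ _).mpr
      rwa [String.toList_ofList]

theorem lemB (ns : String) (hcs : ns.toList ≠ []) (hhead : ns.toList.head? ≠ some '/') :
    (pvScanSegs "" ((PySem.Str.split? ns "/").getD []) = true ↔ CommonCond ns) := by
  have hsplit : (PySem.Str.split? ns "/").getD [] = (mySplit [] ns.toList).map String.ofList := by
    simp only [PySem.Str.split?, PySem.Chars.split?]
    rw [show ("/" : String).toList = ['/'] from by decide]
    simp [splitOn_eq]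
  rw [hsplit]
  obtain ⟨c, r, hcr⟩ : ∃ c r, ns.toList = c :: r := by
    cases h : ns.toList with
    | nil => exact absurd h hcs
    | cons a b => exact ⟨a, b, rfl⟩
  have hc : c ≠ '/' := by
    intro h0; apply hhead; rw [hcr, h0]; rfl
  have hsp1 : mySplit [] ns.toList = mySplit [c] r := by
    rw [hcr]; simp [mySplit, hc]
  obtain ⟨s0, t, hsp, hs0⟩ := mySplit_head_ne_nil r [c] (by simp)
  rw [hsp1, hsp]
  rw [scan_top s0 t hs0]
  have hcum : cumTop (s0 :: t) = cumTop (mySplit [] ns.toList) := by rw [hsp1, hsp]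
  rw [hcum]
  -- translate set membership into the common condition
  constructor
  · intro ⟨q, hq, hq2⟩
    have hmem := (PySem.Set.contains_iff _ _).mp hq2
    rw [pvPrefixSet, PySem.Set.mem_ofList] at hmem
    obtain ⟨pfx, hpfx, hnorm⟩ := List.mem_map.mp hmem
    have hqe : q = (normalize_dirty_path pfx).toList := by
      rw [hnorm, String.toList_ofList]
    refine ⟨pfx, hpfx, ?_⟩
    rw [← hqe]
    rcases (bridge ns.toList q hcs).mp hq with h | h
    · left; rw [h]
    · right; exact h
  · intro ⟨pfx, hpfx, h⟩
    refine ⟨(normalize_dirty_path pfx).toList, ?_, ?_⟩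
    · apply (bridge ns.toList _ hcs).mpr
      rcases h with h | h
      · left; exact h
      · right; exact h
    · apply (PySem.Set.contains_iff _ _).mpr
      rw [pvPrefixSet, PySem.Set.mem_ofList]
      apply List.mem_map.mpr
      exact ⟨pfx, hpfx, String.ofList_toList.symm⟩

-- ===== VERDICT (by name: the statement is the Claim_ definition above) =====
theorem is_ignored_dirty_path_spec : Claim_equal_is_ignored_dirty_path := by
  intro path _
  show is_ignored_dirty_path path = is_ignored_dirty_path_alt path
  rw [show is_ignored_dirty_path path
      = (if normalize_dirty_path path = "" then false
         else DIRTY_IGNORE_PREFIXES.any (fun pfx =>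
          let clean_prefix := normalize_dirty_path pfx
          normalize_dirty_path path == clean_prefix ||
            PySem.Str.startswith (normalize_dirty_path path)
              (String.ofList (clean_prefix.toList ++ ['/'])))) from rfl]
  rw [show is_ignored_dirty_path_alt path
      = (if normalize_dirty_path path = "" then false
         else pvScanSegs ""
          ((PySem.Str.split? (normalize_dirty_path path) "/").getD [])) from rfl]
  by_cases h0 : normalize_dirty_path path = ""
  · rw [if_pos h0, if_pos h0]
  · rw [if_neg h0, if_neg h0]
    rw [Bool.eq_iff_iff]
    rw [lemB (normalize_dirty_path path)
      (fun h => h0 (String.toList_eq_nil_iff.mp h)) (normalize_head path)]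
    exact lemA (normalize_dirty_path path)
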